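-- pv_equiv track=rewrite | github.com/yourZaNoza/algoritms | pz_codes/code7_2.py | count_spaces
-- ===== SOURCE A (Python) =====
-- def count_spaces(string):
--     counts = []
--     current_count = 0
--
--     for i in range(len(string)):
--         c = string[i]
--         if c == ' ':
--             current_count += 1
--         else:
--             counts.append(current_count) if current_count != 0 else...
--             current_count = 0
--
--     if len(counts) < len(string.split()):
--         counts.insert(0, 0)
--
--     return counts
-- ===== SOURCE B (Python) =====
-- def count_spaces(string):
--     counts = []
--     n = len(string)
--     i = string.find(' ')
--     while i != -1:
--         j = i
--         while j < n and string[j] == ' ':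
--             j += 1
--         if j < n:
--             counts.append(j - i)
--         i = string.find(' ', j)
--     if len(counts) < len(string.split()):
--         counts.insert(0, 0)
--     return counts
-- ===== Notes on version B (the rewrite author's own statement) =====
-- stated objective: faster
-- what changed: Replaced A's per-character state machine (a running space counter reset on every non-space) by a run-finder: jump to the next space with str.find, consume the run with an inner pointer, emit its length unless the run touches the end of the string; the tail (split-based word-count check and the single insert of 0) is kept verbatim.
import Mathlib
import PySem

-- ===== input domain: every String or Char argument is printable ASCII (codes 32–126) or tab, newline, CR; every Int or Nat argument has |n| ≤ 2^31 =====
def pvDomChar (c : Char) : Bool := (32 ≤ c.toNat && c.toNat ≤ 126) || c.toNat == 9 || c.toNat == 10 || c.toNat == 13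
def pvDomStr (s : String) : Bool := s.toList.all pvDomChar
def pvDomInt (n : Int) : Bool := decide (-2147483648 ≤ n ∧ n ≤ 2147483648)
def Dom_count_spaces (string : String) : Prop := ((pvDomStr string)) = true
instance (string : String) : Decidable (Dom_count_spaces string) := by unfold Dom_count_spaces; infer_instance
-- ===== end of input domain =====

-- B replaces A's per-character state machine by a run-finder (find next space, consume the
-- run, emit its length unless it touches the end); same values, different decomposition.

-- ===== PORT A =====
-- the for-loop of A: state (counts, current_count), one step per character
def pvLoopA : List Char → List Int → Int → List Int
  | [], counts, _ => counts
  | c :: cs, counts, cur =>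
    if c = ' ' then pvLoopA cs counts (cur + 1)
    else pvLoopA cs (if cur ≠ 0 then counts ++ [cur] else counts) 0

def count_spaces (string : String) : List Int :=
  let counts := pvLoopA string.toList [] 0
  if counts.length < ((PySem.Str.split₀ string).length : Int) then PySem.List.insert counts 0 0
  else counts

-- ===== PORT B =====
-- Source B's while loop: 'string.find(' ', …)' = skip to the next space (the non-space branch),
-- the inner while = takeWhile/dropWhile over the space run, append j - i only if j < n (rest ≠ [])
def pvLoopB : List Char → List Int
  | [] => []
  | c :: cs =>
    if c = ' ' then
      let rest := cs.dropWhile (· = ' ')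
      if rest = [] then []
      else (((1 + (cs.takeWhile (· = ' ')).length : Nat) : Int)) :: pvLoopB rest
    else pvLoopB cs
termination_by cs => cs.length
decreasing_by
  · exact Nat.lt_succ_of_le (List.length_dropWhile_le _ _)
  · exact Nat.lt_succ_self _

def count_spaces_alt (string : String) : List Int :=
  let counts := pvLoopB string.toList
  if counts.length < ((PySem.Str.split₀ string).length : Int) then PySem.List.insert counts 0 0
  else counts

-- ===== PRECONDITION & SPEC =====
def Spec_count_spaces (string : String) (out : List Int) : Prop := out = count_spaces_alt string
instance (string : String) (out : List Int) : Decidable (Spec_count_spaces string out) := by unfold Spec_count_spaces; infer_instance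

-- ===== CLAIM (what is proved, stated in full; the proofs are below) =====
def Claim_equal_count_spaces : Prop := ∀ (string : String), Dom_count_spaces string → Spec_count_spaces string (count_spaces string)

-- ===== LEMMAS AND PROOFS =====

-- A's loop with the accumulator split off: the runs emitted from state cur
def pvRuns : List Char → Int → List Int
  | [], _ => []
  | c :: cs, cur =>
    if c = ' ' then pvRuns cs (cur + 1)
    else (if cur ≠ 0 then [cur] else []) ++ pvRuns cs 0

theorem pvLoopA_eq_runs : ∀ (cs : List Char) (counts : List Int) (cur : Int),
    pvLoopA cs counts cur = counts ++ pvRuns cs cur := by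
  intro cs
  induction cs with
  | nil => intro counts cur; simp [pvLoopA, pvRuns]
  | cons c cs ih =>
    intro counts cur
    by_cases h : c = ' '
    · simp [pvLoopA, pvRuns, h, ih]
    · simp only [pvLoopA, pvRuns, if_neg h]
      rw [ih]
      by_cases hc : cur ≠ 0
      · simp [hc]
      · simp [hc]
theorem pvRuns_pos : ∀ (cs : List Char) (k : Int), 1 ≤ k →
    pvRuns cs k =
      if cs.dropWhile (· = ' ') = [] then []
      else (k + ((cs.takeWhile (· = ' ')).length : Int)) :: pvRuns (cs.dropWhile (· = ' ')) 0 := by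
  intro cs
  induction cs with
  | nil => intro k hk; simp [pvRuns]
  | cons c cs ih =>
    intro k hk
    by_cases h : c = ' '
    · subst h
      simp only [pvRuns, ih (k + 1) (by omega), List.dropWhile_cons, List.takeWhile_cons,
        decide_eq_true_eq]
      split_ifs
      all_goals
        first
          | rfl
          | (refine congrArg₂ List.cons ?_ rfl; simp only [List.length_cons]; push_cast; omega)
    · have hk0 : k ≠ 0 := by omega
      simp [pvRuns, h, hk0]

theorem pvRuns_zero_eq_loopB : ∀ (cs : List Char), pvRuns cs 0 = pvLoopB cs := by
  intro cs
  induction cs using pvLoopB.induct with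
  | case1 => simp [pvRuns, pvLoopB]
  | case2 cs rest h =>
    have h' : cs.dropWhile (· = ' ') = [] := h
    have hl : pvRuns (' ' :: cs) 0 = pvRuns cs 1 := by simp [pvRuns]
    rw [hl, pvRuns_pos cs 1 le_rfl, if_pos h']
    simp [pvLoopB, h']
  | case3 cs rest h ih =>
    have h' : ¬ cs.dropWhile (· = ' ') = [] := h
    have ih' : pvRuns (cs.dropWhile (· = ' ')) 0 = pvLoopB (cs.dropWhile (· = ' ')) := ih
    have hl : pvRuns (' ' :: cs) 0 = pvRuns cs 1 := by simp [pvRuns]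
    rw [hl, pvRuns_pos cs 1 le_rfl, if_neg h', ih']
    simp only [pvLoopB]
    rw [if_neg h']
    refine congrArg₂ List.cons ?_ rfl
    push_cast
    omega
  | case4 c cs h ih =>
    simp [pvRuns, pvLoopB, h, ih]

-- ===== VERDICT (by name: the statement is the Claim_ definition above) =====
theorem count_spaces_spec : Claim_equal_count_spaces := by
  intro s _
  unfold Spec_count_spaces count_spaces count_spaces_alt
  rw [pvLoopA_eq_runs, pvRuns_zero_eq_loopB]
  simp
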